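-- pv_equiv track=rewrite | github.com/limaofu/cofable | cofnet.py | maskint_to_wildcard_mask
-- ===== SOURCE A (Python) =====
-- def maskint_to_wildcard_mask(maskint: int) -> str:
--     """
--     将子网掩码数字型 转为 反掩码，例如：
--     输入 16 输出 "0.0.255.255"
--     输入 24 输出 "0.0.0.255
--     【输入错误会抛出Exception异常】
--     """
--     if maskint < 0 or maskint > 32:
--         raise Exception("子网掩码数值应在[0-32]", maskint)
--     wildcard_mask = [255, 255, 255, 255]
--     i = 0
--     while maskint >= 8:
--         wildcard_mask[i] = 0
--         i += 1
--         maskint -= 8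
--     if i < 4:
--         wildcard_mask[i] = 2 ** (8 - maskint) - 1
--     return ".".join(map(str, wildcard_mask))
-- ===== SOURCE B (Python) =====
-- def maskint_to_wildcard_mask(maskint: int) -> str:
--     if maskint < 0 or maskint > 32:
--         raise Exception("子网掩码数值应在[0-32]", maskint)
--     w = (1 << (32 - maskint)) - 1
--     return ".".join(str((w >> s) & 255) for s in (24, 16, 8, 0))
-- ===== Notes on version B (the rewrite author's own statement) =====
-- stated objective: idiomatic
-- what changed: Replaces the octet-by-octet while loop over a mutable 4-list with a closed-form 32-bit computation: w = (1<<(32-maskint))-1 and extraction of the four octets by shift-and-mask.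
import Mathlib
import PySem

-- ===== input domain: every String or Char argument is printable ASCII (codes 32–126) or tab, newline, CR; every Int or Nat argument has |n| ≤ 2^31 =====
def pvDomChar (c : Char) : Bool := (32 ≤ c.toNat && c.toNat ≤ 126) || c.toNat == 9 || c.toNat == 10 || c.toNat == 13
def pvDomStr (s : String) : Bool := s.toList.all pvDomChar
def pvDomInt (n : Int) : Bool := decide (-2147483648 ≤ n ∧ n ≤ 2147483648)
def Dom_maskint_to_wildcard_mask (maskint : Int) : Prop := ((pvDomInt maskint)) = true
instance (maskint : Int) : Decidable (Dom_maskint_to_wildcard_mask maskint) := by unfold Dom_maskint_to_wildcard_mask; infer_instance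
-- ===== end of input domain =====

-- B replaces A's octet-by-octet while loop with a closed-form 32-bit shift/mask computation (objective: more idiomatic).

-- ===== PORT A =====
-- the while loop: while maskint >= 8: wildcard_mask[i] = 0; i += 1; maskint -= 8
-- fuel (m.toNat) only bounds the recursion; the loop body and state are A's
def pvLoopA : Nat → Int → Nat → List Int → Int × Nat × List Int
  | 0, m, i, wm => (m, i, wm)
  | fuel + 1, m, i, wm =>
    if 8 ≤ m then pvLoopA fuel (m - 8) (i + 1) (wm.set i 0) else (m, i, wm)

def maskint_to_wildcard_mask (maskint : Int) : String :=
  if maskint < 0 ∨ maskint > 32 then ""   -- Python raises Exception here; excluded by Pre_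
  else
    let r := pvLoopA maskint.toNat maskint 0 [255, 255, 255, 255]
    let m := r.1
    let i := r.2.1
    let wm := r.2.2
    let wm := if i < 4 then wm.set i (2 ^ (8 - m).toNat - 1) else wm
    PySem.Str.join "." (wm.map PySem.Int.toStr)

-- ===== PORT B =====
def maskint_to_wildcard_mask_alt (maskint : Int) : String :=
  if maskint < 0 ∨ maskint > 32 then ""   -- Python raises Exception here; excluded by Pre_
  else
    let w : Int := 2 ^ (32 - maskint).toNat - 1
    PySem.Str.join "."
      (([24, 16, 8, 0] : List Nat).map (fun s => PySem.Int.toStr ((w / 2 ^ s) % 256)))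

-- ===== PRECONDITION & SPEC =====
-- Pre_ excludes exactly the inputs where A raises Exception (maskint outside [0,32])
def Pre_maskint_to_wildcard_mask (maskint : Int) : Prop := 0 ≤ maskint ∧ maskint ≤ 32
instance (maskint : Int) : Decidable (Pre_maskint_to_wildcard_mask maskint) := by
  unfold Pre_maskint_to_wildcard_mask; infer_instance
def pvWitness_maskint_to_wildcard_mask : Int := 24

def Spec_maskint_to_wildcard_mask (maskint : Int) (out : String) : Prop := out = maskint_to_wildcard_mask_alt maskint
instance (maskint : Int) (out : String) : Decidable (Spec_maskint_to_wildcard_mask maskint out) := by unfold Spec_maskint_to_wildcard_mask; infer_instance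

-- ===== CLAIM (what is proved, stated in full; the proofs are below) =====
def Claim_equal_maskint_to_wildcard_mask : Prop := ∀ (maskint : Int), Dom_maskint_to_wildcard_mask maskint → Pre_maskint_to_wildcard_mask maskint → Spec_maskint_to_wildcard_mask maskint (maskint_to_wildcard_mask maskint)

-- ===== LEMMAS AND PROOFS =====

set_option maxRecDepth 4000
set_option maxHeartbeats 1000000

-- ===== VERDICT (by name: the statement is the Claim_ definition above) =====
theorem maskint_to_wildcard_mask_spec : Claim_equal_maskint_to_wildcard_mask := by
  intro maskint _ hpre
  obtain ⟨h0, h32⟩ := hpre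
  unfold Spec_maskint_to_wildcard_mask
  interval_cases maskint <;>
    decide
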